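-- pv_equiv track=rewrite | github.com/rgmundo524/tdccp_analysis | scripts/plot_tdccp_address_bubble_net_negative.py | resolve_address_column
-- ===== SOURCE A (Python) =====
-- from typing import Iterable, Optional, Sequence, Set
--
-- def resolve_address_column(columns: Sequence[str]) -> Optional[str]:
--     """Return the column name that most likely contains wallet addresses."""
--
--     normalized = [(col, (col or "").strip().lower()) for col in columns if col]
--     preferred = [
--         "from_address",
--         "address",
--         "addr",
--         "wallet_address",
--         "wallet",
--         "spike_address",
--         "highlight_address",
--         "account_address",
--         "account",
--     ]
--     for target in preferred:
--         for original, lowered in normalized: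
--             if lowered == target:
--                 return original
--
--     for original, lowered in normalized:
--         if "address" in lowered and not lowered.startswith("to_"):
--             return original
--     return None
-- ===== SOURCE B (Python) =====
-- from typing import Optional, Sequence
--
-- _PREFERRED = [
--     "from_address",
--     "address",
--     "addr",
--     "wallet_address",
--     "wallet",
--     "spike_address",
--     "highlight_address",
--     "account_address",
--     "account",
-- ]
--
--
-- def resolve_address_column(columns: Sequence[str]) -> Optional[str]:
--     """Return the column name that most likely contains wallet addresses."""
--     # Single pass: score every column (preferred index, or 9 for a generic
--     # "address"-looking name) and keep the first column with the lowest score.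
--     best_rank = len(_PREFERRED) + 1
--     best = None
--     for col in columns:
--         if not col:
--             continue
--         lowered = col.strip().lower()
--         if lowered in _PREFERRED:
--             rank = _PREFERRED.index(lowered)
--         elif "address" in lowered and not lowered.startswith("to_"):
--             rank = len(_PREFERRED)
--         else:
--             continue
--         if rank < best_rank:
--             best_rank, best = rank, col
--     return best
-- ===== Notes on version B (the rewrite author's own statement) =====
-- stated objective: alternative
-- what changed: B is a single argmin pass: each column gets a score (its index in the preferred list, 9 for a generic 'address'-looking name, otherwise skipped) and B keeps the first column with the lowest score, replacing A's staged search (build a normalized list, rescan it per preferred target, then a separate substring-fallback scan).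
import Mathlib
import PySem

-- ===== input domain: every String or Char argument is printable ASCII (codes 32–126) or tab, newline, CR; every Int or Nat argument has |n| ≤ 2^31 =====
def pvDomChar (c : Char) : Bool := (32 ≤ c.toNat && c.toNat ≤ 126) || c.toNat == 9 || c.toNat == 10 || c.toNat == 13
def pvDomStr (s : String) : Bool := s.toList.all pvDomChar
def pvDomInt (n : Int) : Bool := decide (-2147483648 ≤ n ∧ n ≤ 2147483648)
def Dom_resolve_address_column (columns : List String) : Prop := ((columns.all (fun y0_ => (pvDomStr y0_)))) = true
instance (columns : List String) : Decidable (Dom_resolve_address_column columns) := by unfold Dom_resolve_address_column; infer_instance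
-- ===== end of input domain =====

-- B replaces A's staged passes (nested preferred-target rescans, then a
-- substring-fallback scan) by ONE pass that scores each column and keeps the
-- first column of minimal score (argmin with a running best).

-- the priority list (a literal in both Pythons)
def pvPreferred : List String :=
  ["from_address", "address", "addr", "wallet_address", "wallet",
   "spike_address", "highlight_address", "account_address", "account"]

-- col.strip().lower()
def pvLowered (c : String) : String := PySem.Str.lower (PySem.Str.strip c)

-- ===== PORT A =====
-- normalized = [(col, col.strip().lower()) for col in columns if col]
def pvNormA (columns : List String) : List (String × String) :=
  (columns.filter (fun c => c ≠ "")).map (fun c => (c, pvLowered c))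

-- inner loop: first original whose lowered equals target
def pvFindEqA : List (String × String) → String → Option String
  | [], _ => none
  | (o, l) :: rest, t => if l = t then some o else pvFindEqA rest t

-- outer loop over preferred
def pvPrefLoopA (norm : List (String × String)) : List String → Option String
  | [] => none
  | t :: ts =>
    match pvFindEqA norm t with
    | some o => some o
    | none => pvPrefLoopA norm ts

-- fallback scan over normalized
def pvFallbackA : List (String × String) → Option String
  | [] => none
  | (o, l) :: rest =>
    if PySem.Str.isIn "address" l && !PySem.Str.startswith l "to_" then some o
    else pvFallbackA rest

def resolve_address_column (columns : List String) : Option String :=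
  match pvPrefLoopA (pvNormA columns) pvPreferred with
  | some o => some o
  | none => pvFallbackA (pvNormA columns)

-- ===== PORT B =====
-- loop body: score the column and update the running (best_rank, best)
def pvStepB (st : Nat × Option String) (c : String) : Nat × Option String :=
  if c ≠ "" then
    let l := pvLowered c
    match PySem.List.index? pvPreferred l with   -- `lowered in _PREFERRED` + `.index`
    | some r => if r < st.1 then (r, some c) else st
    | none =>
      if PySem.Str.isIn "address" l && !PySem.Str.startswith l "to_" then
        if 9 < st.1 then (9, some c) else st    -- rank = len(_PREFERRED)
      else st                                    -- continue
  else st                                        -- continue (falsy col)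

def resolve_address_column_alt (columns : List String) : Option String :=
  (columns.foldl pvStepB (10, none)).2           -- best_rank = len(_PREFERRED)+1

-- ===== PRECONDITION & SPEC =====
def Spec_resolve_address_column (columns : List String) (out : Option String) : Prop := out = resolve_address_column_alt columns
instance (columns : List String) (out : Option String) : Decidable (Spec_resolve_address_column columns out) := by unfold Spec_resolve_address_column; infer_instance

-- ===== CLAIM (what is proved, stated in full; the proofs are below) =====
def Claim_equal_resolve_address_column : Prop := ∀ (columns : List String), Dom_resolve_address_column columns → Spec_resolve_address_column columns (resolve_address_column columns)

-- ===== LEMMAS AND PROOFS =====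

-- the score B assigns to a column (10 = skipped)
def pvRankOf (c : String) : Nat :=
  if c = "" then 10 else
  match PySem.List.index? pvPreferred (pvLowered c) with
  | some r => r
  | none =>
    if PySem.Str.isIn "address" (pvLowered c) && !PySem.Str.startswith (pvLowered c) "to_" then 9
    else 10

-- first column of a given score
def pvFindRank : List String → Nat → Option String
  | [], _ => none
  | c :: cs, r => if pvRankOf c = r then some c else pvFindRank cs r

-- search the scores in the given order
def pvSearch (cols : List String) : List Nat → Option String
  | [] => none
  | r :: rs =>
    match pvFindRank cols r with
    | some c => some c
    | none => pvSearch cols rs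

theorem pvPreferred_len : pvPreferred.length = 9 := rfl

theorem pvRankOf_le (c : String) : pvRankOf c ≤ 10 := by
  unfold pvRankOf
  split
  · omega
  · split
    · next r h =>
      obtain ⟨hk, -, -⟩ := PySem.List.getElem_of_index?_eq_some h
      rw [pvPreferred_len] at hk
      omega
    · split <;> omega

theorem pvStepB_eq (st : Nat × Option String) (h : st.1 ≤ 10) (c : String) :
    pvStepB st c = if pvRankOf c < st.1 then (pvRankOf c, some c) else st := by
  by_cases hc : c = ""
  · subst hc
    have h10 : pvRankOf "" = 10 := by simp [pvRankOf]
    rw [h10, if_neg (by omega)]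
    simp [pvStepB]
  · have h1 : pvStepB st c =
        match PySem.List.index? pvPreferred (pvLowered c) with
        | some r => if r < st.1 then (r, some c) else st
        | none =>
          if PySem.Str.isIn "address" (pvLowered c) && !PySem.Str.startswith (pvLowered c) "to_" then
            if 9 < st.1 then (9, some c) else st
          else st := by
      simp only [pvStepB, if_pos hc]
    have h2 : pvRankOf c =
        match PySem.List.index? pvPreferred (pvLowered c) with
        | some r => r
        | none =>
          if PySem.Str.isIn "address" (pvLowered c) && !PySem.Str.startswith (pvLowered c) "to_" then 9
          else 10 := by
      simp only [pvRankOf, if_neg hc]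
    rw [h1, h2]
    rcases hidx : PySem.List.index? pvPreferred (pvLowered c) with _ | r
    · by_cases hcond : (PySem.Str.isIn "address" (pvLowered c)
          && !PySem.Str.startswith (pvLowered c) "to_") = true
      · simp only [if_pos hcond]
      · simp only [if_neg hcond]
        rw [if_neg (by omega)]
    · rfl

theorem pvSearch_nil (rs : List Nat) : pvSearch [] rs = none := by
  induction rs with
  | nil => rfl
  | cons r rs ih => simp [pvSearch, pvFindRank, ih]

theorem pvSearch_single (cols : List String) (r : Nat) :
    pvSearch cols [r] = pvFindRank cols r := by
  show (match pvFindRank cols r with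
        | some c => some c
        | none => pvSearch cols []) = _
  rcases pvFindRank cols r with _ | x <;> rfl

theorem pvSearch_cons_not_mem (c : String) (cs : List String) (rs : List Nat)
    (h : pvRankOf c ∉ rs) : pvSearch (c :: cs) rs = pvSearch cs rs := by
  induction rs with
  | nil => rfl
  | cons r rs ih =>
    have hr : pvRankOf c ≠ r := fun he => h (by simp [he])
    simp only [pvSearch, pvFindRank, if_neg hr]
    rw [ih (fun hm => h (by simp [hm]))]

theorem pvSearch_cons_split (c : String) (cs : List String) (rs₁ rs₂ : List Nat)
    (h : pvRankOf c ∉ rs₁) :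
    pvSearch (c :: cs) (rs₁ ++ pvRankOf c :: rs₂) = (pvSearch cs rs₁).or (some c) := by
  induction rs₁ with
  | nil => simp [pvSearch, pvFindRank]
  | cons r rs₁ ih =>
    have hr : pvRankOf c ≠ r := fun he => h (by simp [he])
    simp only [List.cons_append, pvSearch, pvFindRank, if_neg hr]
    rcases hf : pvFindRank cs r with _ | x
    · rw [ih (fun hm => h (by simp [hm]))]
    · rfl

theorem pvSearch_append (cols : List String) (rs₁ rs₂ : List Nat) :
    pvSearch cols (rs₁ ++ rs₂) = (pvSearch cols rs₁).or (pvSearch cols rs₂) := by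
  induction rs₁ with
  | nil => rfl
  | cons r rs₁ ih =>
    simp only [List.cons_append, pvSearch]
    rcases pvFindRank cols r with _ | x
    · exact ih
    · rfl

theorem pvRange_split (rc br : Nat) (h : rc < br) :
    ∃ t, List.range br = List.range rc ++ rc :: t := by
  obtain ⟨k, hk⟩ : ∃ k, br = (rc + 1) + k := ⟨br - (rc + 1), by omega⟩
  refine ⟨(List.range k).map ((rc + 1) + ·), ?_⟩
  rw [hk, List.range_add, List.range_succ, List.append_assoc]
  rfl

-- the fold is a best-first search over the scores
theorem pvFoldB (cols : List String) : ∀ (br : Nat) (b : Option String), br ≤ 10 →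
    (cols.foldl pvStepB (br, b)).2 = (pvSearch cols (List.range br)).or b := by
  induction cols with
  | nil => intro br b _; simp [pvSearch_nil]
  | cons c cs ih =>
    intro br b hbr
    rw [List.foldl_cons, pvStepB_eq (br, b) hbr c]
    by_cases h : pvRankOf c < br
    · rw [if_pos h, ih _ _ (pvRankOf_le c)]
      obtain ⟨t, ht⟩ := pvRange_split (pvRankOf c) br h
      rw [ht, pvSearch_cons_split c cs _ t (by simp [List.mem_range])]
      rcases pvSearch cs (List.range (pvRankOf c)) with _ | x <;> rfl
    · rw [if_neg h, ih _ _ hbr,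
        pvSearch_cons_not_mem c cs _ (by simp only [List.mem_range]; omega)]

-- A's inner scan for a preferred target t equals the scan for t's score
theorem pvFindEqA_eq (cols : List String) (t : String) (r : Nat)
    (h : PySem.List.index? pvPreferred t = some r) :
    pvFindEqA (pvNormA cols) t = pvFindRank cols r := by
  obtain ⟨hk, hget, -⟩ := PySem.List.getElem_of_index?_eq_some h
  induction cols with
  | nil => rfl
  | cons c cs ih =>
    by_cases hc : c = ""
    · have hn : pvNormA (c :: cs) = pvNormA cs := by simp [pvNormA, List.filter, hc]
      rw [hn, ih]
      have hne : pvRankOf c ≠ r := by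
        rw [pvRankOf, if_pos hc]
        rw [pvPreferred_len] at hk
        omega
      simp [pvFindRank, hne]
    · have hn : pvNormA (c :: cs) = (c, pvLowered c) :: pvNormA cs := by
        simp [pvNormA, List.filter, hc]
      rw [hn]
      have hiff : pvLowered c = t ↔ pvRankOf c = r := by
        constructor
        · intro he
          rw [pvRankOf, if_neg hc, he, h]
        · intro he
          rw [pvRankOf, if_neg hc] at he
          rcases hidx : PySem.List.index? pvPreferred (pvLowered c) with _ | rr
          · rw [hidx] at he
            simp only at he
            rw [pvPreferred_len] at hk
            split at he <;> omega
          · rw [hidx] at he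
            simp only at he
            obtain ⟨hk2, hget2, -⟩ := PySem.List.getElem_of_index?_eq_some hidx
            subst he
            rw [← hget2, hget]
      show (if pvLowered c = t then some c else pvFindEqA (pvNormA cs) t) = _
      by_cases he : pvLowered c = t
      · rw [if_pos he, pvFindRank, if_pos (hiff.mp he)]
      · rw [if_neg he, pvFindRank, if_neg (fun hr => he (hiff.mpr hr)), ih]

-- A's preferred loop = score search over 0..8
theorem pvPrefLoopA_eq (cols : List String) :
    pvPrefLoopA (pvNormA cols) pvPreferred = pvSearch cols (List.range 9) := by
  have hr : List.range 9 = [0, 1, 2, 3, 4, 5, 6, 7, 8] := by decide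
  rw [hr]
  show pvPrefLoopA (pvNormA cols)
      ["from_address", "address", "addr", "wallet_address", "wallet",
       "spike_address", "highlight_address", "account_address", "account"] = _
  simp only [pvPrefLoopA, pvSearch,
    pvFindEqA_eq cols "from_address" 0 (by decide),
    pvFindEqA_eq cols "address" 1 (by decide),
    pvFindEqA_eq cols "addr" 2 (by decide),
    pvFindEqA_eq cols "wallet_address" 3 (by decide),
    pvFindEqA_eq cols "wallet" 4 (by decide),
    pvFindEqA_eq cols "spike_address" 5 (by decide),
    pvFindEqA_eq cols "highlight_address" 6 (by decide),
    pvFindEqA_eq cols "account_address" 7 (by decide),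
    pvFindEqA_eq cols "account" 8 (by decide)]

theorem pvFindRank_none (cols : List String) (r : Nat)
    (h : pvFindRank cols r = none) : ∀ c ∈ cols, pvRankOf c ≠ r := by
  induction cols with
  | nil => simp
  | cons c cs ih =>
    intro x hx
    rw [List.mem_cons] at hx
    rw [pvFindRank] at h
    split at h
    · exact absurd h (by simp)
    · rcases hx with hx | hx
      · subst hx; assumption
      · exact ih h x hx

theorem pvSearch_none (cols : List String) (rs : List Nat)
    (h : pvSearch cols rs = none) : ∀ r ∈ rs, ∀ c ∈ cols, pvRankOf c ≠ r := by
  induction rs with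
  | nil => simp
  | cons r rs ih =>
    rw [pvSearch] at h
    rcases hf : pvFindRank cols r with _ | x
    · rw [hf] at h
      intro rr hrr c hc
      rw [List.mem_cons] at hrr
      rcases hrr with hrr | hrr
      · subst hrr; exact pvFindRank_none cols rr hf c hc
      · exact ih h rr hrr c hc
    · rw [hf] at h; exact absurd h (by simp)

-- when no column scores below 9, A's fallback = the scan for score 9
theorem pvFallbackA_eq (cols : List String)
    (h : ∀ c ∈ cols, ¬ pvRankOf c < 9) :
    pvFallbackA (pvNormA cols) = pvFindRank cols 9 := by
  induction cols with
  | nil => rfl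
  | cons c cs ih =>
    have hcs : ∀ x ∈ cs, ¬ pvRankOf x < 9 := fun x hx => h x (by simp [hx])
    by_cases hc : c = ""
    · have hn : pvNormA (c :: cs) = pvNormA cs := by simp [pvNormA, List.filter, hc]
      have hr : pvRankOf c = 10 := by rw [pvRankOf, if_pos hc]
      rw [hn, ih hcs, pvFindRank, if_neg (by omega)]
    · have hn : pvNormA (c :: cs) = (c, pvLowered c) :: pvNormA cs := by
        simp [pvNormA, List.filter, hc]
      have hge : ¬ pvRankOf c < 9 := h c (by simp)
      have hidx : PySem.List.index? pvPreferred (pvLowered c) = none := by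
        rcases hi : PySem.List.index? pvPreferred (pvLowered c) with _ | rr
        · rfl
        · exfalso
          obtain ⟨hk, -, -⟩ := PySem.List.getElem_of_index?_eq_some hi
          rw [pvPreferred_len] at hk
          have hre : pvRankOf c = rr := by
            rw [pvRankOf, if_neg hc, hi]
          omega
      have hrank : pvRankOf c =
          if PySem.Str.isIn "address" (pvLowered c) && !PySem.Str.startswith (pvLowered c) "to_"
          then 9 else 10 := by rw [pvRankOf, if_neg hc, hidx]
      rw [hn]
      show (if PySem.Str.isIn "address" (pvLowered c) && !PySem.Str.startswith (pvLowered c) "to_"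
            then some c else pvFallbackA (pvNormA cs)) = _
      by_cases hcond : (PySem.Str.isIn "address" (pvLowered c)
          && !PySem.Str.startswith (pvLowered c) "to_") = true
      · rw [if_pos hcond, pvFindRank, if_pos (by rw [hrank, if_pos hcond])]
      · rw [if_neg hcond, ih hcs, pvFindRank,
          if_neg (by rw [hrank, if_neg hcond]; omega)]

-- ===== VERDICT (by name: the statement is the Claim_ definition above) =====
theorem resolve_address_column_spec : Claim_equal_resolve_address_column := by
  intro columns _
  unfold Spec_resolve_address_column resolve_address_column resolve_address_column_alt
  rw [pvFoldB columns 10 none (by omega), Option.or_none, pvPrefLoopA_eq,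
    show List.range 10 = List.range 9 ++ [9] from List.range_succ,
    pvSearch_append]
  rcases hs : pvSearch columns (List.range 9) with _ | x
  · have hno : ∀ c ∈ columns, ¬ pvRankOf c < 9 := by
      intro c hc hlt
      exact pvSearch_none columns _ hs (pvRankOf c) (by simp [List.mem_range, hlt]) c hc rfl
    rw [pvFallbackA_eq columns hno]
    show _ = (none : Option String).or (pvSearch columns [9])
    rw [Option.none_or, pvSearch_single]
  · rfl
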